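-- pv_equiv track=rewrite | github.com/version0-1/wiki-extract | wiki_extract/characters/extract_character_candidates.py | _template_first_param
-- ===== SOURCE A (Python) =====
-- def _template_first_param(s: str, param_start: int, k: int) -> str:
--     """テンプレート内の最初の | の手前（第1パラメータ）を返す。ネスト外の | のみ対象。"""
--     content = s[param_start:k]
--     first_pipe = len(content)
--     pos = 0
--     depth = 0
--     while pos < len(content):
--         if pos < len(content) - 1 and content[pos:pos + 2] == '{{':
--             depth += 1
--             pos += 2
--         elif pos < len(content) - 1 and content[pos:pos + 2] == '}}':
--             depth -= 1
--             pos += 2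
--         elif content[pos] == '|' and depth == 0:
--             first_pipe = pos
--             break
--         else:
--             pos += 1
--     return content[:first_pipe].strip()
-- ===== SOURCE B (Python) =====
-- def _template_first_param(s: str, param_start: int, k: int) -> str:
--     """Locate pipe candidates with str.find, validate top-levelness by brace-pair counting."""
--     content = s[param_start:k]
--     start = 0
--     while True:
--         pipe = content.find('|', start)
--         if pipe == -1:
--             return content.strip()
--         if content.count('{{', 0, pipe) == content.count('}}', 0, pipe):
--             return content[:pipe].strip()
--         start = pipe + 1
-- ===== Notes on version B (the rewrite author's own statement) =====
-- stated objective: alternative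
-- what changed: Replaces A's single character-by-character state machine (tracking nesting depth while stepping over '{{'/'}}' pairs) by a find/count decomposition: str.find locates each '|' candidate and str.count of '{{' and '}}' before the candidate decides whether it is at top level.
import Mathlib
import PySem

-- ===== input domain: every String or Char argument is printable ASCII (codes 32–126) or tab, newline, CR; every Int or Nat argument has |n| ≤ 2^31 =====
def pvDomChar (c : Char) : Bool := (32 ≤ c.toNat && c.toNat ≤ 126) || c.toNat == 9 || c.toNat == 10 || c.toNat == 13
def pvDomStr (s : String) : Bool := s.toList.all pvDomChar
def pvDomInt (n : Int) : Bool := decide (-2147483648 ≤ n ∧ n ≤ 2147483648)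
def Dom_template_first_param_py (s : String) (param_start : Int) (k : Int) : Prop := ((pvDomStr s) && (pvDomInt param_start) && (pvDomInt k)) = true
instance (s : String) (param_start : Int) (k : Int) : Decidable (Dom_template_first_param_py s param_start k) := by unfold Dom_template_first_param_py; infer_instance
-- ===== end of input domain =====

-- B replaces A's character-by-character depth-tracking scan by locating '|' candidates with
-- str.find and validating top-levelness by counting '{{' / '}}' pairs before each candidate
-- (objective: alternative decomposition; same exact return value).

-- ===== PORT A =====
-- A's while loop: the first two branches consume a '{{' / '}}' pair (pos += 2, depth ± 1),
-- the third branch breaks returning pos at a top-level '|', else pos += 1; when the loop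
-- runs off the end, first_pipe keeps its initial value len(content) (= the final pos).
def loopA : List Char → Nat → Int → Nat
  | a :: b :: rest, pos, depth =>
      if a = '{' ∧ b = '{' then loopA rest (pos + 2) (depth + 1)
      else if a = '}' ∧ b = '}' then loopA rest (pos + 2) (depth - 1)
      else if a = '|' ∧ depth = 0 then pos
      else loopA (b :: rest) (pos + 1) depth
  | [a], pos, depth => if a = '|' ∧ depth = 0 then pos else pos + 1
  | [], pos, _ => pos

def template_first_param_py (s : String) (param_start : Int) (k : Int) : String :=
  let content := (PySem.Str.slice s (some param_start) (some k)).toList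
  let first_pipe := loopA content 0 0
  String.ofList (PySem.Chars.strip (PySem.List.slice content none (some (first_pipe : Int))))

-- ===== PORT B =====
-- needed by loopB's decreasing_by: a found pipe lies in [start, len)
theorem findFrom_pipe_bound (l : List Char) (start : Nat) :
    PySem.Chars.findFrom l ['|'] (start : Int) none = -1 ∨
      (start ≤ (PySem.Chars.findFrom l ['|'] (start : Int) none).toNat ∧
       (PySem.Chars.findFrom l ['|'] (start : Int) none).toNat < l.length) := by
  by_cases hs : start ≤ l.length
  · by_cases h : PySem.Chars.findFrom l ['|'] (start : Int) none = -1
    · exact Or.inl h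
    · obtain ⟨h1, h2, -⟩ := PySem.Chars.findFrom_natCast_spec l ['|'] start hs h
      refine Or.inr ⟨by omega, ?_⟩
      rcases h2 with ⟨t, ht⟩
      have := congrArg List.length ht
      simp at this
      omega
  · left
    simp only [PySem.Chars.findFrom, PySem.Chars.find]
    split <;> simp_all <;> omega

-- Source B's while loop: content.find('|', start), then content.count(sub, 0, pipe); Python's
-- count(sub, 0, pipe) equals count of the slice content[:pipe] (exact: the bounds window
-- is a slice and sub must lie fully inside it), ported as count of that slice.
def loopB (content : List Char) (start : Nat) : List Char :=
  let pipe := PySem.Chars.findFrom content ['|'] (start : Int) none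
  if _h : pipe = -1 then PySem.Chars.strip content
  else if PySem.Chars.count (PySem.List.slice content none (some pipe)) ['{', '{'] =
          PySem.Chars.count (PySem.List.slice content none (some pipe)) ['}', '}'] then
    PySem.Chars.strip (PySem.List.slice content none (some pipe))
  else loopB content (pipe.toNat + 1)
termination_by content.length - start
decreasing_by
  have := findFrom_pipe_bound content start
  simp only [pipe] at *
  omega

def template_first_param_py_alt (s : String) (param_start : Int) (k : Int) : String :=
  let content := (PySem.Str.slice s (some param_start) (some k)).toList
  String.ofList (loopB content 0)

-- ===== PRECONDITION & SPEC =====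
def Spec_template_first_param_py (s : String) (param_start : Int) (k : Int) (out : String) : Prop := out = template_first_param_py_alt s param_start k
instance (s : String) (param_start : Int) (k : Int) (out : String) : Decidable (Spec_template_first_param_py s param_start k out) := by unfold Spec_template_first_param_py; infer_instance

-- ===== CLAIM (what is proved, stated in full; the proofs are below) =====
def Claim_equal_template_first_param_py : Prop := ∀ (s : String) (param_start : Int) (k : Int), Dom_template_first_param_py s param_start k → Spec_template_first_param_py s param_start k (template_first_param_py s param_start k)

-- ===== LEMMAS AND PROOFS =====

-- greedy non-overlapping count of the two-character pattern [c, c]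
def pairs : List Char → Char → Nat
  | a :: b :: rest, c => if a = c ∧ b = c then 1 + pairs rest c else pairs (b :: rest) c
  | _, _ => 0

theorem pairs_cons_skip (a : Char) (xs : List Char) (c : Char)
    (h : ¬(a = c ∧ xs.head? = some c)) : pairs (a :: xs) c = pairs xs c := by
  cases xs with
  | nil => simp [pairs]
  | cons b t =>
    simp only [List.head?] at h
    simp only [pairs, ite_eq_right_iff]
    intro hc
    exact absurd ⟨hc.1, by rw [hc.2]⟩ h

-- net brace balance of a prefix, as B counts it
def bal (l : List Char) : Int := (pairs l '{' : Int) - (pairs l '}' : Int)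

theorem bal_open (xs : List Char) : bal ('{' :: '{' :: xs) = 1 + bal xs := by
  unfold bal
  have h1 : pairs ('{' :: '{' :: xs) '{' = 1 + pairs xs '{' := by simp [pairs]
  have h2 : pairs ('{' :: '{' :: xs) '}' = pairs xs '}' := by
    rw [pairs_cons_skip, pairs_cons_skip] <;> simp
  rw [h1, h2]; push_cast; ring

theorem bal_close (xs : List Char) : bal ('}' :: '}' :: xs) = bal xs - 1 := by
  unfold bal
  have h1 : pairs ('}' :: '}' :: xs) '}' = 1 + pairs xs '}' := by simp [pairs]
  have h2 : pairs ('}' :: '}' :: xs) '{' = pairs xs '{' := by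
    rw [pairs_cons_skip, pairs_cons_skip] <;> simp
  rw [h1, h2]; push_cast; ring

theorem bal_cons_skip (a : Char) (xs : List Char)
    (h1 : ¬(a = '{' ∧ xs.head? = some '{')) (h2 : ¬(a = '}' ∧ xs.head? = some '}')) :
    bal (a :: xs) = bal xs := by
  unfold bal; rw [pairs_cons_skip a xs '{' h1, pairs_cons_skip a xs '}' h2]

-- bal of a prefix extended through a non-pair position
theorem bal_cons_take (a b : Char) (xs : List Char) (m : Nat)
    (h1 : ¬(a = '{' ∧ b = '{')) (h2 : ¬(a = '}' ∧ b = '}')) :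
    bal (a :: (b :: xs).take m) = bal ((b :: xs).take m) := by
  cases m with
  | zero => simp [bal, pairs]
  | succ m =>
    apply bal_cons_skip <;> simp only [List.take, List.head?] <;>
      rintro ⟨rfl, hb⟩ <;> exact (by simp_all)

-- PySem.Chars.count of a doubled-character pattern is the greedy pair count
theorem countgo_eq (c : Char) : ∀ (fuel : Nat) (l : List Char) (acc : Nat),
    l.length ≤ fuel → PySem.Chars.count.go [c, c] fuel l acc = acc + pairs l c := by
  intro fuel
  induction fuel with
  | zero =>
    intro l acc h
    have : l = [] := by cases l <;> simp_all
    subst this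
    simp [PySem.Chars.count.go, pairs]
  | succ fuel ih =>
    intro l acc h
    cases l with
    | nil => simp [PySem.Chars.count.go, pairs]
    | cons a t =>
      rw [PySem.Chars.count.go]
      by_cases hp : [c, c].isPrefixOf (a :: t)
      · cases t with
        | nil => simp [List.isPrefixOf] at hp
        | cons b t' =>
          have hab : c = a ∧ c = b := by simpa [List.isPrefixOf] using hp
          obtain ⟨rfl, rfl⟩ : a = c ∧ b = c := ⟨hab.1.symm, hab.2.symm⟩
          simp only [beq_self_eq_true, Bool.and_self, Bool.true_and, if_true,
            List.length_cons, List.length_nil, List.drop_succ_cons, List.drop_zero]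
          rw [ih t' (acc + 1) (by simp at h; omega)]
          simp [pairs]
          omega
      · simp only [hp, Bool.false_eq_true, if_false]
        rw [ih t acc (by simp at h; omega)]
        have hskip : pairs (a :: t) c = pairs t c := by
          apply pairs_cons_skip
          rintro ⟨rfl, hh⟩
          cases t with
          | nil => simp at hh
          | cons b t' =>
            simp only [List.head?, Option.some_inj] at hh
            subst hh
            simp [List.isPrefixOf] at hp
        rw [hskip]

theorem count_eq_pairs (l : List Char) (c : Char) :
    PySem.Chars.count l [c, c] = pairs l c := by
  simp only [PySem.Chars.count, List.isEmpty_cons, if_false, Bool.false_eq_true]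
  rw [countgo_eq c l.length l 0 le_rfl]
  omega

-- characterization of A's scanner: it returns pos + (the first index j with l[j] = '|' and
-- d + bal (take j) = 0), or pos + length when there is no such index
theorem Achar : ∀ (l : List Char) (pos : Nat) (d : Int),
    (loopA l pos d = pos + l.length ∧ ∀ j, l[j]? = some '|' → d + bal (l.take j) ≠ 0) ∨
    (∃ j, loopA l pos d = pos + j ∧ l[j]? = some '|' ∧ d + bal (l.take j) = 0 ∧
          ∀ i, i < j → l[i]? = some '|' → d + bal (l.take i) ≠ 0) := by
  intro l pos d
  fun_induction loopA l pos d with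
  | case1 a b rest pos d hab ih =>
    obtain ⟨rfl, rfl⟩ := hab
    rcases ih with ⟨h, hno⟩ | ⟨j, hj, hpipe, hbal, hmin⟩
    · left
      constructor
      · simp [h]; omega
      · intro j hj
        match j, hj with
        | (j+2), hj =>
          simp only [List.getElem?_cons_succ] at hj
          simp only [List.take_succ_cons, bal_open]
          have := hno j hj
          omega
    · right
      refine ⟨j + 2, ?_, by simpa using hpipe, ?_, ?_⟩
      · simp [hj]; omega
      · simp only [List.take_succ_cons, bal_open]; omega
      · intro i hi hpi
        match i, hi, hpi with
        | (i+2), hi, hpi =>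
          simp only [List.getElem?_cons_succ] at hpi
          simp only [List.take_succ_cons, bal_open]
          have := hmin i (by omega) hpi
          omega
  | case2 a b rest pos d hab hcd ih =>
    obtain ⟨rfl, rfl⟩ := hcd
    rcases ih with ⟨h, hno⟩ | ⟨j, hj, hpipe, hbal, hmin⟩
    · left
      constructor
      · simp [h]; omega
      · intro j hj
        match j, hj with
        | (j+2), hj =>
          simp only [List.getElem?_cons_succ] at hj
          simp only [List.take_succ_cons, bal_close]
          have := hno j hj
          omega
    · right
      refine ⟨j + 2, ?_, by simpa using hpipe, ?_, ?_⟩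
      · simp [hj]; omega
      · simp only [List.take_succ_cons, bal_close]; omega
      · intro i hi hpi
        match i, hi, hpi with
        | (i+2), hi, hpi =>
          simp only [List.getElem?_cons_succ] at hpi
          simp only [List.take_succ_cons, bal_close]
          have := hmin i (by omega) hpi
          omega
  | case3 a b rest pos d h1 h2 h3 =>
    right
    obtain ⟨rfl, rfl⟩ := h3
    exact ⟨0, by simp, by simp, by simp [bal], by omega⟩
  | case4 a b rest pos d h1 h2 h3 ih =>
    rcases ih with ⟨h, hno⟩ | ⟨j, hj, hpipe, hbal, hmin⟩
    · left
      constructor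
      · simp [h]; omega
      · intro j hj
        match j with
        | 0 =>
          simp only [List.getElem?_cons_zero, Option.some_inj] at hj
          simp only [List.take_zero, bal]
          simp [pairs]
          intro hd; exact h3 ⟨hj, hd⟩
        | (j+1) =>
          simp only [List.getElem?_cons_succ] at hj
          rw [List.take_succ_cons, bal_cons_take a b rest j h1 h2]
          exact hno j hj
    · right
      refine ⟨j + 1, ?_, by simpa using hpipe, ?_, ?_⟩
      · simp [hj]; omega
      · rwa [List.take_succ_cons, bal_cons_take a b rest j h1 h2]
      · intro i hi hpi
        match i with
        | 0 =>
          simp only [List.getElem?_cons_zero, Option.some_inj] at hpi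
          simp only [List.take_zero, bal]
          simp [pairs]
          intro hd; exact h3 ⟨hpi, hd⟩
        | (i+1) =>
          simp only [List.getElem?_cons_succ] at hpi
          rw [List.take_succ_cons, bal_cons_take a b rest i h1 h2]
          exact hmin i (by omega) hpi
  | case5 a pos d h =>
    right
    obtain ⟨rfl, rfl⟩ := h
    exact ⟨0, by simp [loopA], by simp, by simp [bal], by omega⟩
  | case6 a pos d h =>
    left
    constructor
    · simp [loopA, h]
    · intro j hj
      match j with
      | 0 =>
        simp only [List.getElem?_cons_zero, Option.some_inj] at hj
        simp [bal, pairs]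
        intro hd; exact h ⟨hj, hd⟩
      | (j+1) => simp at hj
  | case7 pos d => left; simp

-- what a non-(-1) findFrom of '|' means: the first pipe at index ≥ start
theorem findFrom_found (l : List Char) (start : Nat)
    (h : PySem.Chars.findFrom l ['|'] (start : Int) none ≠ -1) :
    (0:Int) ≤ PySem.Chars.findFrom l ['|'] (start : Int) none ∧
    start ≤ (PySem.Chars.findFrom l ['|'] (start : Int) none).toNat ∧
    (PySem.Chars.findFrom l ['|'] (start : Int) none).toNat < l.length ∧
    l[(PySem.Chars.findFrom l ['|'] (start : Int) none).toNat]? = some '|' ∧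
      ∀ i, start ≤ i → i < (PySem.Chars.findFrom l ['|'] (start : Int) none).toNat →
        l[i]? ≠ some '|' := by
  have hs : start ≤ l.length := by
    by_contra hs
    apply h
    rcases findFrom_pipe_bound l start with h1 | h1
    · exact h1
    · omega
  obtain ⟨h1, h2, h3⟩ := PySem.Chars.findFrom_natCast_spec l ['|'] start hs h
  have hlt : (PySem.Chars.findFrom l ['|'] (start : Int) none).toNat < l.length := by
    rcases findFrom_pipe_bound l start with hb | hb
    · exact absurd hb h
    · exact hb.2
  refine ⟨by omega, by omega, hlt, ?_, ?_⟩
  · rcases h2 with ⟨t, ht⟩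
    have : (l.drop (PySem.Chars.findFrom l ['|'] (start : Int) none).toNat).head? = some '|' := by
      rw [← ht]; rfl
    rwa [List.head?_drop] at this
  · intro i hi1 hi2 hpi
    apply h3 i hi1 hi2
    obtain ⟨hil, hget⟩ := List.getElem?_eq_some_iff.mp hpi
    exact ⟨l.drop (i + 1), by rw [← List.getElem_cons_drop hil, hget]; rfl⟩

theorem findFrom_none (l : List Char) (start : Nat)
    (h : PySem.Chars.findFrom l ['|'] (start : Int) none = -1) :
    ∀ j, start ≤ j → l[j]? ≠ some '|' := by
  intro j hj hpj
  have hjl : j < l.length := by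
    by_contra hh
    rw [List.getElem?_eq_none (by omega)] at hpj
    exact absurd hpj (by simp)
  have hs : start ≤ l.length := by omega
  rw [PySem.Chars.findFrom_natCast_eq_neg_one_iff l ['|'] start hs] at h
  apply h
  have hmem : '|' ∈ l.drop start := by
    apply List.mem_of_getElem? (i := j - start)
    rw [List.getElem?_drop, show start + (j - start) = j by omega]
    exact hpj
  obtain ⟨s1, s2, hsplit⟩ := List.mem_iff_append.mp hmem
  exact ⟨s1, s2, by rw [hsplit]; simp⟩

-- characterization of B's loop: strip of the prefix before the first balanced pipe ≥ start
theorem Bchar : ∀ (l : List Char) (start : Nat),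
    ((∀ j, start ≤ j → l[j]? = some '|' → bal (l.take j) ≠ 0) ∧
      loopB l start = PySem.Chars.strip l) ∨
    (∃ j, start ≤ j ∧ l[j]? = some '|' ∧ bal (l.take j) = 0 ∧
          (∀ i, start ≤ i → i < j → l[i]? = some '|' → bal (l.take i) ≠ 0) ∧
          loopB l start = PySem.Chars.strip (l.take j)) := by
  intro l start
  fun_induction loopB l start with
  | case1 st pipe hm =>
    have hdef : pipe = PySem.Chars.findFrom l ['|'] (st : Int) none := rfl
    left
    exact ⟨fun j hj hpj => absurd hpj (findFrom_none l st (hdef ▸ hm) j hj), rfl⟩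
  | case2 st pipe hm hcount =>
    have hdef : pipe = PySem.Chars.findFrom l ['|'] (st : Int) none := rfl
    rw [hdef] at hcount hm
    right
    obtain ⟨hp0, hsp, hpl, hpp, hmin⟩ := findFrom_found l st hm
    rw [PySem.List.slice_to _ hp0] at hcount
    rw [count_eq_pairs, count_eq_pairs] at hcount
    refine ⟨_, hsp, hpp, by unfold bal; omega, ?_, ?_⟩
    · intro i hi1 hi2 hpi
      exact absurd hpi (hmin i hi1 hi2)
    · rw [hdef, PySem.List.slice_to _ hp0]
  | case3 st pipe hm hcount ih =>
    have hdef : pipe = PySem.Chars.findFrom l ['|'] (st : Int) none := rfl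
    rw [hdef] at hcount hm
    obtain ⟨hp0, hsp, hpl, hpp, hmin⟩ := findFrom_found l st hm
    rw [PySem.List.slice_to _ hp0, count_eq_pairs, count_eq_pairs] at hcount
    have hbalp : bal (l.take (PySem.Chars.findFrom l ['|'] (st : Int) none).toNat) ≠ 0 := by
      unfold bal; omega
    rw [hdef] at ih
    rcases ih with ⟨hno, hres⟩ | ⟨j, hj1, hj2, hj3, hj4, hres⟩
    · left
      refine ⟨?_, hres⟩
      intro j hj hpj
      rcases Nat.lt_trichotomy j (PySem.Chars.findFrom l ['|'] (st : Int) none).toNat with hc | hc | hc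
      · exact absurd hpj (hmin j hj hc)
      · subst hc; exact hbalp
      · exact hno j (by omega) hpj
    · right
      refine ⟨j, by omega, hj2, hj3, ?_, hres⟩
      intro i hi1 hi2 hpi
      rcases Nat.lt_trichotomy i (PySem.Chars.findFrom l ['|'] (st : Int) none).toNat with hc | hc | hc
      · exact absurd hpi (hmin i hi1 hc)
      · subst hc; exact hbalp
      · exact hj4 i (by omega) hi2 hpi

-- the two loops agree: same stripped prefix
theorem core (l : List Char) :
    PySem.Chars.strip (l.take (loopA l 0 0)) = loopB l 0 := by
  rcases Achar l 0 0 with ⟨hA, hnoA⟩ | ⟨j, hA, hj, hbal, hmin⟩ <;>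
    rcases Bchar l 0 with ⟨hnoB, hB⟩ | ⟨p, -, hp, hpbal, hpmin, hB⟩
  · rw [hA, hB]; simp
  · exact absurd hpbal (by simpa using hnoA p hp)
  · exact absurd hbal (by simpa using hnoB j (Nat.zero_le j) hj)
  · have : j = p := by
      rcases Nat.lt_trichotomy j p with h | h | h
      · exact absurd hbal (by simpa using hpmin j (Nat.zero_le j) h hj)
      · exact h
      · exact absurd hpbal (by simpa using hmin p h hp)
    rw [hA, hB, this]; simp

-- ===== VERDICT (by name: the statement is the Claim_ definition above) =====
theorem template_first_param_py_spec : Claim_equal_template_first_param_py := by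
  intro s a k _
  unfold Spec_template_first_param_py template_first_param_py template_first_param_py_alt
  simp only [PySem.List.slice_to_natCast]
  exact congrArg String.ofList (core _)
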